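-- pv_equiv track=rewrite | github.com/satish1134/web_app | importcsv.py | group_by_subject_area
-- ===== SOURCE A (Python) =====
-- def group_by_subject_area(data):
--     grouped_data = {}
--     for row in data:
--         subject_area = row['SUBJECT_AREA']
--         if subject_area not in grouped_data:
--             grouped_data[subject_area] = []
--         grouped_data[subject_area].append(row)
--     return grouped_data
-- ===== SOURCE B (Python) =====
-- def group_by_subject_area(data):
--     keys = dict.fromkeys(row['SUBJECT_AREA'] for row in data)
--     return {k: [row for row in data if row['SUBJECT_AREA'] == k] for k in keys}
-- ===== Notes on version B (the rewrite author's own statement) =====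
-- stated objective: alternative
-- what changed: B builds the result non-incrementally: it first collects the distinct SUBJECT_AREA values in first-occurrence order with dict.fromkeys, then materialises each group with one filter pass over the data per key, instead of A's single pass that appends each row to a growing dict bucket.
import Mathlib
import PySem

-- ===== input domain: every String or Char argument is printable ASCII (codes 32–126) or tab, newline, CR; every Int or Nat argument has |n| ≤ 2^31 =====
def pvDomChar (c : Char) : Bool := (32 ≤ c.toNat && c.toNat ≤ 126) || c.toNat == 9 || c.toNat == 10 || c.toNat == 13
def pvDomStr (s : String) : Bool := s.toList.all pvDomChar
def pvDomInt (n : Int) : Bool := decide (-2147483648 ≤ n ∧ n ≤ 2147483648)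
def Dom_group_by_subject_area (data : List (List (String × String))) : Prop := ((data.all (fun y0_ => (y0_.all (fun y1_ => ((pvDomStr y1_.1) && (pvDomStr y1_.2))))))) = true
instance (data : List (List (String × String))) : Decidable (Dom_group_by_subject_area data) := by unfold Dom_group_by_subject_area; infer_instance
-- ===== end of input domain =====

-- B replaces A's single-pass bucket-appending loop by a two-phase plan (distinct keys in
-- first-occurrence order, then one filter pass per key); alternative decomposition, not faster.

-- row['SUBJECT_AREA'] (both Pythons perform this same lookup; KeyError excluded by Pre_)
def pvSubj (row : List (String × String)) : String :=
  (PySem.Dict.mk row).getD "SUBJECT_AREA" ""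

-- ===== PORT A =====
def group_by_subject_area (data : List (List (String × String))) : List (String × List (List (String × String))) :=
  (data.foldl
    (fun grouped_data row =>
      let subject_area := pvSubj row
      let grouped_data :=
        if grouped_data.contains subject_area then grouped_data
        else grouped_data.insert subject_area []
      grouped_data.modify subject_area [] (· ++ [row]))
    PySem.Dict.empty).items

-- ===== PORT B =====
def group_by_subject_area_alt (data : List (List (String × String))) : List (String × List (List (String × String))) :=
  let keys := PySem.List.dedup (data.map pvSubj)
  (keys.foldl
    (fun d k => d.insert k (data.filter (fun row => pvSubj row == k)))
    PySem.Dict.empty).items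

-- ===== PRECONDITION & SPEC =====
-- Pre_: every row has a 'SUBJECT_AREA' key; on a row without it the Python raises KeyError.
def Pre_group_by_subject_area (data : List (List (String × String))) : Prop :=
  (data.all (fun row => (PySem.Dict.mk row).contains "SUBJECT_AREA")) = true
instance (data : List (List (String × String))) : Decidable (Pre_group_by_subject_area data) := by
  unfold Pre_group_by_subject_area; infer_instance

def pvWitness_group_by_subject_area : (List (List (String × String))) :=
  [[("SUBJECT_AREA", "math"), ("NAME", "a")],
   [("SUBJECT_AREA", "bio")],
   [("SUBJECT_AREA", "math"), ("NAME", "b")]]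

def Spec_group_by_subject_area (data : List (List (String × String))) (out : List (String × List (List (String × String)))) : Prop := out = group_by_subject_area_alt data
instance (data : List (List (String × String))) (out : List (String × List (List (String × String)))) : Decidable (Spec_group_by_subject_area data out) := by unfold Spec_group_by_subject_area; infer_instance

-- ===== CLAIM (what is proved, stated in full; the proofs are below) =====
def Claim_equal_group_by_subject_area : Prop := ∀ (data : List (List (String × String))), Dom_group_by_subject_area data → Pre_group_by_subject_area data → Spec_group_by_subject_area data (group_by_subject_area data)

-- ===== LEMMAS AND PROOFS =====

-- A's 'if absent then insert empty, then append' step equals a bare modify-append step.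
theorem pv_fresh_step (d : PySem.Dict String (List (List (String × String)))) (k : String)
    (row : List (String × String)) (h : d.contains k = false) :
    (d.insert k []).modify k ([] : List (List (String × String))) (· ++ [row]) = d.modify k [] (· ++ [row]) := by
  have hk : ∀ p ∈ d.items, p.1 ≠ k := by
    intro p hp hpk
    have hc : d.contains p.1 = true := by
      rw [PySem.Dict.contains_iff_mem_keys]
      exact PySem.Dict.mem_keys_of_mem_items d hp
    rw [hpk, h] at hc; exact Bool.false_ne_true hc
  simp [PySem.Dict.modify, PySem.Dict.insert, h]
  constructor
  · apply (List.map_congr_left ?_).trans (List.map_id _)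
    intro p hp
    simp [hk p hp]
  · rw [PySem.Dict.getD_of_not_contains d [] h]
    have hf : List.find? (fun p => p.1 == k) d.items = none :=
      List.find?_eq_none.mpr (fun p hp => by simpa using hk p hp)
    simp [PySem.Dict.getD, PySem.Dict.get?, hf]

theorem group_by_subject_area_spec : Claim_equal_group_by_subject_area := by
  intro data _ _
  unfold Spec_group_by_subject_area group_by_subject_area group_by_subject_area_alt
  have hstep : data.foldl
      (fun grouped_data row =>
        let subject_area := pvSubj row
        let grouped_data :=
          if grouped_data.contains subject_area then grouped_data
          else grouped_data.insert subject_area []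
        grouped_data.modify subject_area [] (· ++ [row]))
      PySem.Dict.empty
      = data.foldl (fun d row => d.modify (pvSubj row) [] (· ++ [row])) PySem.Dict.empty := by
    congr 1
    funext d row
    by_cases h : d.contains (pvSubj row)
    · simp [h]
    · simp only [h, Bool.false_eq_true, if_false]
      exact pv_fresh_step d (pvSubj row) row (by simpa using h)
  rw [hstep]
  set G := data.foldl (fun d row => d.modify (pvSubj row) [] (· ++ [row])) PySem.Dict.empty with hG
  have hnd : G.keys.Nodup := by
    exact PySem.Dict.nodup_keys_foldl_modify_key data pvSubj [] (fun d x => (· ++ [x])) PySem.Dict.empty (by simp)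
  have hkeys : G.keys = PySem.List.dedup (data.map pvSubj) := by
    rw [hG, PySem.Dict.keys_foldl_modify_key]
    simp [PySem.Set.update_nil_left]
  have hget : ∀ k, G.getD k [] = data.filter (fun r => pvSubj r == k) := by
    intro k
    have hmap : G = (data.map (fun r => (pvSubj r, r))).foldl
        (fun d p => d.modify p.1 [] (· ++ [p.2])) PySem.Dict.empty := by
      rw [hG, List.foldl_map]
    rw [hmap, PySem.Dict.getD_foldl_modify_append]
    simp [List.filter_map, List.map_map, Function.comp_def]
  rw [PySem.Dict.items_eq_map_keys G hnd []]
  show _ = ((PySem.List.dedup (data.map pvSubj)).foldl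
      (fun d k => d.insert k (data.filter (fun row => pvSubj row == k))) PySem.Dict.empty).items
  have hB := PySem.Dict.items_foldl_insert_fresh (l := PySem.List.dedup (data.map pvSubj))
        (d := PySem.Dict.empty) (k := fun a => a)
        (v := fun a => data.filter (fun row => pvSubj row == a))
        (by intro a _; simp) (by simp)
  beta_reduce at hB
  rw [hB]
  have hfun : (fun k => (k, G.getD k [])) =
      (fun a => (a, List.filter (fun row => pvSubj row == a) data)) :=
    funext (fun k => by rw [hget k])
  simp [hkeys, hfun, PySem.Dict.empty]
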